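-- pv_equiv track=rewrite | github.com/poohcid/class | onsite/Cards.py | last_card
-- ===== SOURCE A (Python) =====
-- def last_card(card):
--     """return_last_number"""
--     text = ""
--     for count in card:
--         if count != ",":
--             text += count
--         else:
--             text = ""
--     number = int(text)
--     return number
-- ===== SOURCE B (Python) =====
-- def last_card(card):
--     """return_last_number"""
--     idx = card.rfind(',')
--     return int(card[idx+1:])
-- ===== Notes on version B (the rewrite author's own statement) =====
-- stated objective: idiomatic
-- what changed: Replaces the character-by-character accumulate-and-reset loop with locating the last comma once via rfind and slicing off the tail, then converting with int.
import Mathlib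
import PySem

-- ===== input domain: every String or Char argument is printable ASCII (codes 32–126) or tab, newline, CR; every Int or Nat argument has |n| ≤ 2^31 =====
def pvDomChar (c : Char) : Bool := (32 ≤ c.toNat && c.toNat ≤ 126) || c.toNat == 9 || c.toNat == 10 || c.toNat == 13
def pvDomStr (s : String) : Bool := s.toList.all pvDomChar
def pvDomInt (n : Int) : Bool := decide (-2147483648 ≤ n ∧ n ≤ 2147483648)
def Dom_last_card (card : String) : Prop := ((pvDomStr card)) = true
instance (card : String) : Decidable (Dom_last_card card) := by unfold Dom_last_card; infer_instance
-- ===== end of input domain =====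

-- B replaces A's accumulate-and-reset character loop with rfind-the-last-comma and one slice (objective: idiomatic).

-- ===== PORT A =====
-- A: scan the string, appending to `text` and resetting it at each comma, then int(text).
def last_card (card : String) : Int :=
  let text := card.toList.foldl (fun text count => if count ≠ ',' then text ++ [count] else []) []
  (PySem.Int.ofChars? text).getD 0

-- ===== PORT B =====
-- B: idx = card.rfind(','); int(card[idx+1:])
def last_card_alt (card : String) : Int :=
  let idx := PySem.Str.rfind card ","
  (PySem.Int.ofStr? (PySem.Str.slice card (some (idx + 1)) none)).getD 0

-- ===== PRECONDITION & SPEC =====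
-- the segment of a string after its last comma (the whole string if there is none)
def pvLastSeg (l : List Char) : List Char := (l.reverse.takeWhile (· ≠ ',')).reverse

-- Pre_ excludes exactly the inputs where Python's int() raises ValueError on the text after the last comma.
def Pre_last_card (card : String) : Prop :=
  (PySem.Int.ofChars? (pvLastSeg card.toList)).isSome = true
instance (card : String) : Decidable (Pre_last_card card) := by unfold Pre_last_card; infer_instance

def pvWitness_last_card : String := "a,12"

def Spec_last_card (card : String) (out : Int) : Prop := out = last_card_alt card
instance (card : String) (out : Int) : Decidable (Spec_last_card card out) := by unfold Spec_last_card; infer_instance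

-- ===== CLAIM (what is proved, stated in full; the proofs are below) =====
def Claim_equal_last_card : Prop := ∀ (card : String), Dom_last_card card → Pre_last_card card → Spec_last_card card (last_card card)

-- ===== LEMMAS AND PROOFS =====

-- A's loop computes the segment after the last comma.
theorem pv_foldl_lastSeg (l : List Char) :
    l.foldl (fun text count => if count ≠ ',' then text ++ [count] else []) [] = pvLastSeg l := by
  induction l using List.reverseRecOn with
  | nil => simp [pvLastSeg]
  | append_singleton l c ih =>
      simp only [List.foldl_append, List.foldl_cons, List.foldl_nil, ih, pvLastSeg,
        List.reverse_append, List.reverse_cons, List.reverse_nil, List.nil_append]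
      by_cases hc : c = ','
      · simp [hc]
      · simp [hc]

-- the two defining equations of rfind.go, as rewrite rules
theorem pv_go_zero (l sub : List Char) :
    PySem.Chars.rfind.go l sub 0 = if sub.isPrefixOf l then 0 else -1 := by
  rw [PySem.Chars.rfind.go]

theorem pv_go_succ (l sub : List Char) (j : Nat) :
    PySem.Chars.rfind.go l sub (j+1) =
      if sub.isPrefixOf (l.drop (j+1)) then ((j+1 : Nat) : Int) else PySem.Chars.rfind.go l sub j := by
  rw [PySem.Chars.rfind.go]

-- characterisation of rfind.go for the single-character needle ','
theorem pv_go_spec (l : List Char) (j : Nat) (hj : j + 1 ≤ l.length) :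
    PySem.Chars.rfind.go l [','] j =
      (if ((l.take (j+1)).reverse.takeWhile (· ≠ ',')).length = j + 1 then (-1 : Int)
       else (j : Int) - ((l.take (j+1)).reverse.takeWhile (· ≠ ',')).length) := by
  induction j with
  | zero =>
      cases l with
      | nil => simp at hj
      | cons x t =>
          rw [pv_go_zero]
          simp only [List.isPrefixOf, List.take_succ_cons, List.take_zero,
            List.reverse_cons, List.reverse_nil, List.nil_append, List.takeWhile]
          by_cases hx : x = ','
          · simp [hx]
          · simp [hx, Ne.symm hx]
  | succ j ih =>
      have hj1 : j + 1 < l.length := by omega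
      have hdrop : l.drop (j+1) = l[j+1] :: l.drop (j+2) := List.drop_eq_getElem_cons hj1
      have htake : l.take (j+2) = l.take (j+1) ++ [l[j+1]] := by
        rw [List.take_add_one, List.getElem?_eq_getElem hj1]; rfl
      rw [pv_go_succ, hdrop, htake]
      simp only [List.isPrefixOf, List.reverse_append, List.reverse_cons, List.reverse_nil,
        List.nil_append, List.singleton_append, List.takeWhile_cons]
      by_cases hx : l[j+1] = ','
      · simp [hx]
        try omega
      · have hb : ((',' : Char) == l[j+1]) = false := by
          simp only [beq_eq_false_iff_ne]; exact fun h => hx h.symm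
        have hd : (decide (l[j+1] ≠ ',')) = true := by simp [hx]
        simp only [hb, Bool.false_and, Bool.false_eq_true, if_false, hd, if_true,
          List.length_cons, ih (by omega)]
        split_ifs <;> omega

-- rfind in terms of the trailing-non-comma count
theorem pv_rfind_spec (l : List Char) :
    PySem.Chars.rfind l [','] =
      (if (l.reverse.takeWhile (· ≠ ',')).length = l.length then (-1 : Int)
       else (l.length : Int) - 1 - (l.reverse.takeWhile (· ≠ ',')).length) := by
  show PySem.Chars.rfind.go l [','] l.length = _
  cases l with
  | nil =>
      simp only [List.length_nil]
      rw [pv_go_zero]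
      simp [List.isPrefixOf]
  | cons x t =>
      have hlen : (x :: t).length = t.length + 1 := rfl
      rw [hlen, pv_go_succ]
      have hde : (x :: t).drop (t.length + 1) = [] := by simp
      rw [hde]
      simp only [List.isPrefixOf, Bool.false_eq_true, if_false]
      have hspec := pv_go_spec (x :: t) t.length (by simp)
      rw [List.take_of_length_le (by simp)] at hspec
      rw [hspec]
      split_ifs <;> omega

theorem pv_takeWhile_len_le (l : List Char) :
    (l.reverse.takeWhile (· ≠ ',')).length ≤ l.length := by
  have h := (List.takeWhile_prefix (l := l.reverse) (· ≠ ',')).length_le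
  simpa using h

theorem pv_lastSeg_eq_drop (l : List Char) :
    pvLastSeg l = l.drop (l.length - (l.reverse.takeWhile (· ≠ ',')).length) := by
  have hK := pv_takeWhile_len_le l
  have hpre : l.reverse.takeWhile (· ≠ ',') =
      l.reverse.take (l.reverse.takeWhile (· ≠ ',')).length :=
    List.prefix_iff_eq_take.mp (List.takeWhile_prefix _)
  have hrev : (l.drop (l.length - (l.reverse.takeWhile (· ≠ ',')).length)).reverse =
      l.reverse.take (l.reverse.takeWhile (· ≠ ',')).length := by
    rw [List.reverse_drop]
    congr 1
    omega
  apply List.reverse_injective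
  unfold pvLastSeg
  rw [List.reverse_reverse, hrev, ← hpre]

theorem pv_slice_lastSeg (l : List Char) :
    PySem.List.slice l (some (PySem.Chars.rfind l [','] + 1)) none = pvLastSeg l := by
  have hK := pv_takeWhile_len_le l
  rw [pv_rfind_spec, pv_lastSeg_eq_drop]
  split_ifs with h
  · have h0 : l.length - (l.reverse.takeWhile (· ≠ ',')).length = 0 := by omega
    rw [h0, List.drop_zero, show ((-1 : Int) + 1) = (0 : Int) from by norm_num,
      PySem.List.slice_zero_start, PySem.List.slice_none_none]
  · have hcast : ((l.length : Int) - 1 - (l.reverse.takeWhile (· ≠ ',')).length + 1) =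
        ((l.length - (l.reverse.takeWhile (· ≠ ',')).length : Nat) : Int) := by
      omega
    rw [hcast, PySem.List.slice_from_natCast]

-- ===== VERDICT (by name: the statement is the Claim_ definition above) =====
theorem last_card_spec : Claim_equal_last_card := by
  intro card _ _
  unfold Spec_last_card last_card last_card_alt
  simp only [PySem.Str.rfind_eq, pv_foldl_lastSeg, PySem.Int.ofStr?, PySem.Str.toList_slice,
    PySem.Chars.slice_eq_listSlice]
  rw [show (",".toList : List Char) = [','] from rfl, pv_slice_lastSeg]
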